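-- pv_equiv track=rewrite | github.com/lehelkovach/osl-agent-prototype | src/personal_assistant/knowshowgo.py | _extract_common_pattern
-- ===== SOURCE A (Python) =====
-- from typing import Dict, Any, List, Optional, Callable, Union, Tuple
--
-- def _extract_common_pattern(names: List[str]) -> str:
--     """Extract common pattern from a list of names."""
--     if not names:
--         return "Generalized Pattern"
--
--     # Find common words
--     word_sets = [set(name.lower().split()) for name in names if name]
--     if not word_sets:
--         return "Generalized Pattern"
--
--     common_words = word_sets[0]
--     for ws in word_sets[1:]:
--         common_words &= ws
--
--     # Remove common stopwords
--     stopwords = {"the", "a", "an", "to", "for", "on", "in", "at", "form", "pattern"}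
--     common_words -= stopwords
--
--     if common_words:
--         return f"Generalized {' '.join(sorted(common_words)).title()}"
--
--     return "Generalized Pattern"
-- ===== SOURCE B (Python) =====
-- from typing import List
--
-- def _extract_common_pattern(names: List[str]) -> str:
--     """Extract common pattern from a list of names (frequency-count reformulation)."""
--     nonempty = [n for n in names if n]
--     if not nonempty:
--         return "Generalized Pattern"
--
--     counts = {}
--     for n in nonempty:
--         for w in set(n.lower().split()):
--             counts[w] = counts.get(w, 0) + 1
--
--     stopwords = {"the", "a", "an", "to", "for", "on", "in", "at", "form", "pattern"}
--     total = len(nonempty)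
--     words = sorted(w for w, c in counts.items() if c == total and w not in stopwords)
--     if words:
--         return "Generalized " + " ".join(words).title()
--     return "Generalized Pattern"
-- ===== Notes on version B (the rewrite author's own statement) =====
-- stated objective: alternative
-- what changed: Replaces the fold of pairwise set intersections with a single word-frequency dictionary: each non-empty name contributes its unique words once, and the common words are exactly those whose count equals the number of non-empty names.
import Mathlib
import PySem

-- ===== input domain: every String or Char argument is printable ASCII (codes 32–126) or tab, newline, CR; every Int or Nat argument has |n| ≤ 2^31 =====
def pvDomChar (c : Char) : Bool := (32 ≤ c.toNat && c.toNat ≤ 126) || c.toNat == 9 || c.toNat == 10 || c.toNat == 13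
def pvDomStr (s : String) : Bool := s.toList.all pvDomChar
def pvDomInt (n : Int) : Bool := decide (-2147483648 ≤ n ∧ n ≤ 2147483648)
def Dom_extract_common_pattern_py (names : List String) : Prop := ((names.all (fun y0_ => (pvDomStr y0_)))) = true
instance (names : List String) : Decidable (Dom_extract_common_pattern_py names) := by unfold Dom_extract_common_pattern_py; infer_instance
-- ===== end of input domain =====

-- B replaces the fold of pairwise set intersections with one word-frequency dictionary
-- (count per word of how many non-empty names contain it; common = count == number of
-- non-empty names): an alternative single-pass decomposition, same observable behaviour.


-- ===== PORT A =====
-- set(name.lower().split()) — a subexpression both Pythons share verbatim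
def pvWordsOf (n : String) : PySem.Set String :=
  PySem.Set.ofList (PySem.Str.split₀ (PySem.Str.lower n))
-- the stopword set literal (its elements are distinct)
def pvStop : PySem.Set String :=
  PySem.Set.ofList ["the", "a", "an", "to", "for", "on", "in", "at", "form", "pattern"]
-- str.title(), ported by hand (exact on ASCII, the stated domain: a letter is uppercased
-- iff the previous character is not a letter, lowercased otherwise; others pass through)
def pvTitleChars : List Char → Bool → List Char
  | [], _ => []
  | c :: rest, prev =>
    (if PySem.Chars.isalpha c then
        (if prev then PySem.Chars.lowerChar c else PySem.Chars.upperChar c)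
      else c) :: pvTitleChars rest (PySem.Chars.isalpha c)
def pvTitle (s : String) : String := String.ofList (pvTitleChars s.toList false)
def extract_common_pattern_py (names : List String) : String :=
  if names = [] then "Generalized Pattern"
  else
    let word_sets : List (PySem.Set String) := (names.filter (fun n => n ≠ "")).map pvWordsOf
    match word_sets with
    | [] => "Generalized Pattern"
    | ws0 :: rest =>
      let common0 := rest.foldl (fun acc ws => PySem.Set.inter acc ws) ws0
      let common := PySem.Set.diff common0 pvStop
      if common ≠ [] then
        "Generalized " ++ pvTitle (PySem.Str.join " " (PySem.List.sorted common (fun x => x) false))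
      else "Generalized Pattern"
-- ===== PORT B =====
def extract_common_pattern_py_alt (names : List String) : String :=
  let nonempty := names.filter (fun n => n ≠ "")
  if nonempty = [] then "Generalized Pattern"
  else
    let counts : PySem.Dict String Int :=
      nonempty.foldl (fun d n => (pvWordsOf n).foldl (fun d w => d.insert w (d.getD w 0 + 1)) d)
        PySem.Dict.empty
    let total : Int := nonempty.length
    let words :=
      PySem.List.sorted
        ((counts.items.filter (fun p => p.2 == total && !(PySem.Set.contains pvStop p.1))).map (·.1))
        (fun x => x) false
    if words ≠ [] then
      "Generalized " ++ pvTitle (PySem.Str.join " " words)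
    else "Generalized Pattern"


-- ===== PRECONDITION & SPEC =====
def Spec_extract_common_pattern_py (names : List String) (out : String) : Prop := out = extract_common_pattern_py_alt names
instance (names : List String) (out : String) : Decidable (Spec_extract_common_pattern_py names out) := by unfold Spec_extract_common_pattern_py; infer_instance

-- ===== CLAIM (what is proved, stated in full; the proofs are below) =====
def Claim_equal_extract_common_pattern_py : Prop := ∀ (names : List String), Dom_extract_common_pattern_py names → Spec_extract_common_pattern_py names (extract_common_pattern_py names)

-- ===== LEMMAS AND PROOFS =====

theorem mem_foldl_inter (l : List (PySem.Set String)) (s : PySem.Set String) (x : String) :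
    x ∈ l.foldl (fun acc ws => PySem.Set.inter acc ws) s ↔ x ∈ s ∧ ∀ t ∈ l, x ∈ t := by
  induction l generalizing s with
  | nil => simp
  | cons t l ih => simp only [List.foldl_cons]; rw [ih]; simp [PySem.Set.mem_inter]; tauto

theorem nodup_foldl_inter (l : List (PySem.Set String)) (s : PySem.Set String) (hs : s.Nodup) :
    (l.foldl (fun acc ws => PySem.Set.inter acc ws) s).Nodup := by
  induction l generalizing s with
  | nil => exact hs
  | cons t l ih => exact ih _ (PySem.Set.nodup_inter _ _ hs)

theorem nodup_pvWordsOf (n : String) : (pvWordsOf n).Nodup := PySem.Set.nodup_ofList _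

theorem getD_counts (l : List String) (d : PySem.Dict String Int) (w : String) :
    (l.foldl (fun d n => (pvWordsOf n).foldl (fun d w => d.insert w (d.getD w 0 + 1)) d) d).getD w 0
      = d.getD w 0 + ((l.map pvWordsOf).countP (fun ws => w ∈ ws) : Int) := by
  induction l generalizing d with
  | nil => simp
  | cons n l ih =>
    simp only [List.foldl_cons, List.map_cons, List.countP_cons]
    rw [ih, PySem.Dict.getD_foldl_insert_add_one]
    by_cases hm : w ∈ pvWordsOf n
    · rw [List.count_eq_one_of_mem (nodup_pvWordsOf n) hm]; simp [hm]; ring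
    · rw [List.count_eq_zero_of_not_mem hm]; simp [hm]

theorem nodup_keys_counts (l : List String) (d : PySem.Dict String Int) (h : d.keys.Nodup) :
    (l.foldl (fun d n => (pvWordsOf n).foldl (fun d w => d.insert w (d.getD w 0 + 1)) d) d).keys.Nodup := by
  induction l generalizing d with
  | nil => exact h
  | cons n l ih => exact ih _ (PySem.Dict.nodup_keys_foldl_insert _ _ _ h)

theorem mem_keys_counts (l : List String) (d : PySem.Dict String Int) (w : String) :
    w ∈ (l.foldl (fun d n => (pvWordsOf n).foldl (fun d w => d.insert w (d.getD w 0 + 1)) d) d).keys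
      ↔ w ∈ d.keys ∨ ∃ n ∈ l, w ∈ pvWordsOf n := by
  induction l generalizing d with
  | nil => simp
  | cons n l ih =>
    simp only [List.foldl_cons]
    rw [ih, PySem.Dict.keys_foldl_insert, PySem.Set.mem_update]
    simp only [List.mem_cons]
    constructor
    · rintro ((h | h) | ⟨m, hm, hw⟩)
      · exact Or.inl h
      · exact Or.inr ⟨n, Or.inl rfl, h⟩
      · exact Or.inr ⟨m, Or.inr hm, hw⟩
    · rintro (h | ⟨m, (rfl | hm), hw⟩)
      · exact Or.inl (Or.inl h)
      · exact Or.inl (Or.inr hw)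
      · exact Or.inr ⟨m, hm, hw⟩

theorem extract_common_pattern_py_eq (names : List String) :
    extract_common_pattern_py names = extract_common_pattern_py_alt names := by
  unfold extract_common_pattern_py extract_common_pattern_py_alt
  rcases hne : names.filter (fun n => n ≠ "") with _ | ⟨n0, rest⟩
  · by_cases h0 : names = [] <;> simp [h0]
  · have hnames : names ≠ [] := by
      intro h; rw [h] at hne; simp at hne
    simp only [if_neg hnames, List.map_cons, reduceCtorEq, if_neg, ne_eq,
      not_false_iff]
    set counts : PySem.Dict String Int := (n0 :: rest).foldl
        (fun d n => (pvWordsOf n).foldl (fun d w => d.insert w (d.getD w 0 + 1)) d)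
        PySem.Dict.empty with hcounts
    have hnd : counts.keys.Nodup := nodup_keys_counts _ _ (by simp [PySem.Dict.keys_empty])
    set q : String → Bool := fun k =>
      ((counts.getD k 0) == ((n0 :: rest).length : Int)) && !(PySem.Set.contains pvStop k) with hq
    have hitems : (counts.items.filter
          (fun p => p.2 == ((n0 :: rest).length : Int) && !(PySem.Set.contains pvStop p.1))).map (·.1)
        = counts.keys.filter q := by
      rw [PySem.Dict.items_eq_map_keys counts hnd 0, List.filter_map, List.map_map]
      simp [Function.comp_def, hq]
    set LA := PySem.Set.diff
        ((rest.map pvWordsOf).foldl (fun acc ws => PySem.Set.inter acc ws) (pvWordsOf n0)) pvStop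
      with hLA
    have hmem : ∀ x, x ∈ LA ↔ x ∈ counts.keys.filter q := by
      intro x
      have hget := getD_counts (n0 :: rest) PySem.Dict.empty x
      simp only [PySem.Dict.getD_empty, zero_add] at hget
      have hkeys := mem_keys_counts (n0 :: rest) PySem.Dict.empty x
      simp only [PySem.Dict.keys_empty, List.not_mem_nil, false_or] at hkeys
      rw [← hcounts] at hget hkeys
      have hcnt : (counts.getD x 0 = ((n0 :: rest).length : Int))
          ↔ ∀ t ∈ (n0 :: rest).map pvWordsOf, x ∈ t := by
        rw [hget]
        rw [show (((n0 :: rest).length : Nat) : Int)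
              = ((((n0 :: rest).map pvWordsOf).length : Nat) : Int) by simp]
        rw [Nat.cast_inj, List.countP_eq_length]
        simp
      have hstop : ((!(PySem.Set.contains pvStop x)) = true) ↔ x ∉ pvStop := by
        rw [Bool.not_eq_true', Bool.eq_false_iff, Ne, PySem.Set.contains_iff]
      rw [hLA, PySem.Set.mem_diff, mem_foldl_inter, List.mem_filter, hq]
      simp only [Bool.and_eq_true, beq_iff_eq]
      rw [hcnt, hkeys, hstop]
      constructor
      · rintro ⟨⟨h0', hall⟩, hst⟩
        refine ⟨⟨n0, by simp, h0'⟩, ?_, hst⟩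
        intro t ht
        rw [List.map_cons, List.mem_cons] at ht
        rcases ht with rfl | ht
        · exact h0'
        · exact hall t ht
      · rintro ⟨-, hall, hst⟩
        refine ⟨⟨?_, fun t ht => hall t (by rw [List.map_cons, List.mem_cons]; exact Or.inr ht)⟩, hst⟩
        exact hall _ (by rw [List.map_cons]; simp)
    have hLAnd : LA.Nodup :=
      PySem.Set.nodup_diff _ _ (nodup_foldl_inter _ _ (nodup_pvWordsOf n0))
    have hperm : LA.Perm (counts.keys.filter q) :=
      (List.perm_ext_iff_of_nodup hLAnd (hnd.filter q)).mpr hmem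
    have hsort : PySem.List.sorted LA (fun x => x) false
        = PySem.List.sorted (counts.keys.filter q) (fun x => x) false :=
      PySem.List.sorted_eq_sorted_of_perm _ _ _ (fun a b h => h) hperm
    rw [hitems, ← hsort]
    by_cases hLAe : LA = []
    · rw [hLAe]
      simp [PySem.List.sorted_eq_nil_iff]
    · have hsne : PySem.List.sorted LA (fun x => x) false ≠ [] := by
        rw [Ne, PySem.List.sorted_eq_nil_iff]; exact hLAe
      simp [hLAe, hsne]

-- ===== VERDICT (by name: the statement is the Claim_ definition above) =====
theorem extract_common_pattern_py_spec : Claim_equal_extract_common_pattern_py := by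
  intro names _
  unfold Spec_extract_common_pattern_py
  exact extract_common_pattern_py_eq names
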